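-- pv_equiv track=rewrite | github.com/dominikjessen/advent-of-code | 2023/day9/day9.py | extrapolate_history_front
-- ===== SOURCE A (Python) =====
-- from typing import List
--
-- def extrapolate_history_front(history: List[List[int]]) -> List[List[int]]:
--   extrapolated = history[:]
--   n = len(extrapolated)-1
--   while n >= 0:
--     if n == len(extrapolated)-1:
--       extrapolated[n] = [0] + extrapolated[n]
--     else:
--       firstVal = extrapolated[n][0] - extrapolated[n+1][0]
--       extrapolated[n] = [firstVal] + extrapolated[n]
--     n -= 1
--
--   return extrapolated
-- ===== SOURCE B (Python) =====
-- def extrapolate_history_front(history):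
--     if not history:
--         return []
--     rest = extrapolate_history_front(history[1:])
--     first = 0 if not rest else history[0][0] - rest[0][0]
--     return [[first] + history[0]] + rest
-- ===== Notes on version B (the rewrite author's own statement) =====
-- stated objective: simpler
-- what changed: Replaces A's copy-then-mutate backward while loop, which indexes into the half-built list (extrapolated[n+1][0]) and rewrites slots with list.set, by a direct structural recursion on the rows that reads the needed value from the recursive result's head.
-- outside the precondition, e.g. on extrapolate_history_front([[], [1]]): A raises IndexError, B raises IndexError
import Mathlib
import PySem

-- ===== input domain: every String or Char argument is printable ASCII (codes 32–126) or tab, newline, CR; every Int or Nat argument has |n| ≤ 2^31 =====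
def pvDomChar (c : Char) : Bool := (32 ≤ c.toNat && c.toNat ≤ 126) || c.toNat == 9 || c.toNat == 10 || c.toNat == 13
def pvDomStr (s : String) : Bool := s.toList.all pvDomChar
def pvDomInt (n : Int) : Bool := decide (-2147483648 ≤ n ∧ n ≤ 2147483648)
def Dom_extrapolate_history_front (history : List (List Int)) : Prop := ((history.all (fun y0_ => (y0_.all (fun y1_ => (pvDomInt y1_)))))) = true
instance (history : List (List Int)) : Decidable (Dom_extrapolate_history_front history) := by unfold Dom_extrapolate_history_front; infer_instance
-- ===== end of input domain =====

-- B replaces A's backward index-loop that mutates a copied list by a direct structural recursion on the rows; same return value (objective: simpler).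

-- ===== PORT A =====
-- the while loop: n counts down; goA (k+1) ext performs the body with n = k, then recurses.
-- extrapolated[n][0] is ported as (… .getD n []).headD 0; inside Pre_ the row is nonempty, matching Python (which raises IndexError otherwise).
def extrapolate_history_front_loopA : Nat → List (List Int) → List (List Int)
  | 0, ext => ext
  | k+1, ext =>
    extrapolate_history_front_loopA k
      (if k == ext.length - 1 then
        ext.set k ([0] ++ ext.getD k [])
      else
        ext.set k ([((ext.getD k []).headD 0) - ((ext.getD (k+1) []).headD 0)] ++ ext.getD k []))

def extrapolate_history_front (history : List (List Int)) : List (List Int) :=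
  -- extrapolated = history[:]; n = len(extrapolated)-1; while n >= 0: …
  extrapolate_history_front_loopA history.length history

-- ===== PORT B =====
-- history[0][0] / rest[0][0] ported as headD; inside Pre_ those rows are nonempty, matching Python.
def extrapolate_history_front_alt : List (List Int) → List (List Int)
  | [] => []
  | row :: tl =>
    let rest := extrapolate_history_front_alt tl
    let first := if rest = [] then 0 else row.headD 0 - (rest.headD []).headD 0
    ([first] ++ row) :: rest

-- ===== PRECONDITION & SPEC =====
-- Pre_ excludes exactly the inputs where the Pythons raise IndexError: a non-last row that is empty.
def Pre_extrapolate_history_front (history : List (List Int)) : Prop :=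
  ∀ r ∈ history.dropLast, r ≠ []
instance (history : List (List Int)) : Decidable (Pre_extrapolate_history_front history) := by
  unfold Pre_extrapolate_history_front; infer_instance
def pvWitness_extrapolate_history_front : List (List Int) := [[10, 13, 16], [3, 3], [0]]

def Spec_extrapolate_history_front (history : List (List Int)) (out : List (List Int)) : Prop := out = extrapolate_history_front_alt history
instance (history : List (List Int)) (out : List (List Int)) : Decidable (Spec_extrapolate_history_front history out) := by unfold Spec_extrapolate_history_front; infer_instance

-- ===== CLAIM (what is proved, stated in full; the proofs are below) =====
def Claim_equal_extrapolate_history_front : Prop := ∀ (history : List (List Int)), Dom_extrapolate_history_front history → Pre_extrapolate_history_front history → Spec_extrapolate_history_front history (extrapolate_history_front history)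

-- ===== LEMMAS AND PROOFS =====

theorem pv_getD_at (l : List (List Int)) (r : List Int) (s : List (List Int)) :
    (l ++ r :: s).getD l.length [] = r := by
  induction l with
  | nil => rfl
  | cons a t ih => simp

theorem pv_getD_at_succ (l : List (List Int)) (r q : List Int) (s : List (List Int)) :
    (l ++ r :: q :: s).getD (l.length + 1) [] = q := by
  induction l with
  | nil => rfl
  | cons a t ih => simp

theorem pv_set_at (l : List (List Int)) (r x : List Int) (s : List (List Int)) :
    (l ++ r :: s).set l.length x = l ++ x :: s := by
  induction l with
  | nil => rfl
  | cons a t ih => simp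

theorem pv_alt_cons (row : List Int) (tl : List (List Int)) :
    extrapolate_history_front_alt (row :: tl)
      = ([if extrapolate_history_front_alt tl = [] then 0
          else row.headD 0 - ((extrapolate_history_front_alt tl).headD []).headD 0] ++ row)
          :: extrapolate_history_front_alt tl := rfl

theorem pv_alt_ne_nil (p : List Int) (ps : List (List Int)) :
    extrapolate_history_front_alt (p :: ps) ≠ [] := by
  rw [pv_alt_cons]; simp

theorem pv_loopA_inv : ∀ (pre post : List (List Int)),
    extrapolate_history_front_loopA pre.length (pre ++ extrapolate_history_front_alt post)
      = extrapolate_history_front_alt (pre ++ post) := by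
  intro pre
  induction pre using List.reverseRecOn with
  | nil => intro post; simp [extrapolate_history_front_loopA]
  | append_singleton l r ih =>
    intro post
    cases post with
    | nil =>
      have hlen : (l ++ [r]).length = l.length + 1 := by simp
      rw [hlen]
      show extrapolate_history_front_loopA l.length _ = _
      have hcond : (l.length == (l ++ [r] ++ extrapolate_history_front_alt []).length - 1) = true := by
        simp [extrapolate_history_front_alt]
      rw [hcond]
      simp only [if_true, extrapolate_history_front_alt, List.append_nil]
      have h1 : (l ++ [r]) = l ++ r :: [] := by simp
      rw [h1, pv_getD_at, pv_set_at]
      have := ih [r]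
      rw [pv_alt_cons] at this
      simpa [extrapolate_history_front_alt] using this
    | cons p ps =>
      have hlen : (l ++ [r]).length = l.length + 1 := by simp
      rw [hlen]
      show extrapolate_history_front_loopA l.length _ = _
      obtain ⟨q, qs, hq⟩ : ∃ q qs, extrapolate_history_front_alt (p :: ps) = q :: qs := by
        cases h : extrapolate_history_front_alt (p :: ps) with
        | nil => exact absurd h (pv_alt_ne_nil p ps)
        | cons q qs => exact ⟨q, qs, rfl⟩
      rw [hq]
      have hcond : (l.length == (l ++ [r] ++ q :: qs).length - 1) = false := by
        simp only [beq_eq_false_iff_ne, ne_eq, List.length_append, List.length_cons]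
        omega
      rw [hcond]
      simp only [Bool.false_eq_true, if_false]
      have h1 : (l ++ [r] ++ q :: qs) = l ++ r :: q :: qs := by simp
      rw [h1, pv_getD_at]
      have h2 : (l ++ r :: q :: qs).getD (l.length + 1) [] = q := pv_getD_at_succ l r q qs
      rw [h2, pv_set_at]
      have hval : extrapolate_history_front_alt (r :: p :: ps)
          = ([r.headD 0 - q.headD 0] ++ r) :: q :: qs := by
        rw [pv_alt_cons, hq]; simp
      rw [show l ++ ([r.headD 0 - q.headD 0] ++ r) :: q :: qs
            = l ++ extrapolate_history_front_alt (r :: p :: ps) by rw [hval],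
          ih (r :: p :: ps)]
      simp

-- ===== VERDICT (by name: the statement is the Claim_ definition above) =====
theorem extrapolate_history_front_spec : Claim_equal_extrapolate_history_front := by
  intro history _ _
  unfold Spec_extrapolate_history_front extrapolate_history_front
  have := pv_loopA_inv history []
  simpa [extrapolate_history_front_alt] using this
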